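-- pv_equiv track=rewrite | github.com/ontology-tools/binche2 | visualitations_and_pruning.py | find_paths_to_root_with_map
-- ===== SOURCE A (Python) =====
-- def find_paths_to_root_with_map(start_class, parents_map):
--     paths = []
--
--     def dfs(current_class, current_path):
--         # if the class has no parents in the map, it's a root
--         parents = parents_map.get(current_class, [])
--         if not parents:
--             paths.append(current_path)
--             return
--
--         for parent in parents:
--             dfs(parent, current_path + [parent])
--
--     dfs(start_class, [start_class])
--     return paths
-- ===== SOURCE B (Python) =====
-- def find_paths_to_root_with_map(start_class, parents_map):
--     # Iterative DFS with an explicit stack instead of nested recursion.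
--     paths = []
--     stack = [(start_class, [start_class])]
--     while stack:
--         cls, path = stack.pop()
--         parents = parents_map.get(cls, [])
--         if not parents:
--             paths.append(path)
--         else:
--             # push in reversed order so the LIFO stack visits parents left-to-right
--             for parent in reversed(parents):
--                 stack.append((parent, path + [parent]))
--     return paths
-- ===== Notes on version B (the rewrite author's own statement) =====
-- stated objective: alternative
-- what changed: Replaces the recursive nested-closure DFS (mutating an enclosing list) with an iterative DFS over an explicit worklist stack, pushing parents in reversed order to keep A's left-to-right path order.
import Mathlib
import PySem

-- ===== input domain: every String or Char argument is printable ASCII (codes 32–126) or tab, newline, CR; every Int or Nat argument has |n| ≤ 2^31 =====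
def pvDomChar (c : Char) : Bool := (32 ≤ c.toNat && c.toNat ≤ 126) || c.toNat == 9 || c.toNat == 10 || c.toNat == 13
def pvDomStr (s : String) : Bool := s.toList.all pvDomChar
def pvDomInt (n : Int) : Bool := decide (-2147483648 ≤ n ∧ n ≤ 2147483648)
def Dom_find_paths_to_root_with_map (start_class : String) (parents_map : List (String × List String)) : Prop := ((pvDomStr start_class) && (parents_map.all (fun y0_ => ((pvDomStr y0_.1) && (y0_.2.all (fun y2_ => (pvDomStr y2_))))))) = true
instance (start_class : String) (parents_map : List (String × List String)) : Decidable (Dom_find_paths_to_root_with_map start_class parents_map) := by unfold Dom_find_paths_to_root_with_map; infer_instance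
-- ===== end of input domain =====

-- B replaces A's recursive nested-closure DFS by an iterative DFS over an explicit stack
-- (parents pushed in reversed order); same return value on every input where A returns.

-- ===== PORT A =====
-- parents_map.get(c, []): association-list lookup (first match), shared dict primitive.
def pvParents (parents_map : List (String × List String)) (c : String) : List String :=
  (PySem.Dict.mk parents_map).getD c []

-- Recursive DFS of A; the Nat argument is pure fuel making the recursion total
-- (under Pre_ the initial fuel is never exhausted). The accumulator `acc` is A's
-- mutable `paths` list.
def pvDfsA (parents_map : List (String × List String)) :
    Nat → String → List String → List (List String) → List (List String)
  | 0, current_class, current_path, acc =>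
      if (pvParents parents_map current_class).isEmpty then acc ++ [current_path]
      else acc  -- out of fuel (unreachable under Pre_)
  | fuel + 1, current_class, current_path, acc =>
      let parents := pvParents parents_map current_class
      if parents.isEmpty then acc ++ [current_path]
      else parents.foldl (fun a parent => pvDfsA parents_map fuel parent (current_path ++ [parent]) a) acc

def find_paths_to_root_with_map (start_class : String) (parents_map : List (String × List String)) : List (List String) :=
  pvDfsA parents_map (parents_map.length + 1) start_class [start_class] []

-- ===== PORT B =====
-- Branching bound: the longest parents list in the map (used only by the termination measure).
def pvBr (parents_map : List (String × List String)) : Nat :=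
  parents_map.foldr (fun e r => max e.2.length r) 0

theorem pvBr_getD_le (parents_map : List (String × List String)) (c : String) :
    (pvParents parents_map c).length ≤ pvBr parents_map := by
  induction parents_map with
  | nil => simp [pvParents, PySem.Dict.getD_eq_get?_getD, PySem.Dict.get?, pvBr]
  | cons e rest ih =>
      obtain ⟨k, v⟩ := e
      simp only [pvParents, PySem.Dict.getD_eq_get?_getD, PySem.Dict.get?_mk_cons, pvBr,
        List.foldr_cons] at *
      by_cases h : k == c
      · simp [h]
      · simp only [h] at *
        simp only [Bool.false_eq_true, if_neg, not_false_iff]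
        omega

-- pushing a block via foldl-cons is prepending the reversed block
theorem pv_foldl_cons {α β : Type} (g : α → β) :
    ∀ (l : List α) (st : List β), l.foldl (fun st q => g q :: st) st = l.reverse.map g ++ st := by
  intro l
  induction l with
  | nil => simp
  | cons x xs ih => intro st; simp [ih, List.map_append]

-- Iterative DFS of B over an explicit worklist stack (head = top of stack); each entry
-- carries its fuel so the loop is total (under Pre_ the fuel is never exhausted).
def pvStackRun (parents_map : List (String × List String)) :
    List (Nat × String × List String) → List (List String) → List (List String)
  | [], paths => paths
  | (fuel, cls, path) :: rest, paths =>
      let parents := pvParents parents_map cls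
      if parents.isEmpty then pvStackRun parents_map rest (paths ++ [path])
      else
        match fuel with
        | 0 => pvStackRun parents_map rest paths  -- out of fuel (unreachable under Pre_)
        | fuel' + 1 =>
            pvStackRun parents_map
              (parents.reverse.foldl (fun st parent => (fuel', parent, path ++ [parent]) :: st) rest) paths
  termination_by st _ => (st.map (fun e => (pvBr parents_map + 1) ^ e.1)).sum
  decreasing_by
  · have h1 : 1 ≤ (pvBr parents_map + 1) ^ fuel := Nat.one_le_pow _ _ (Nat.succ_pos _)
    simp only [List.map_cons, List.sum_cons]
    omega
  · simp only [List.map_cons, List.sum_cons, pow_zero]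
    omega
  · rw [pv_foldl_cons, List.reverse_reverse, List.map_append, List.sum_append, List.map_map]
    have hlen : (pvParents parents_map cls).length ≤ pvBr parents_map := pvBr_getD_le parents_map cls
    have h1 : 1 ≤ (pvBr parents_map + 1) ^ fuel' := Nat.one_le_pow _ _ (Nat.succ_pos _)
    have hsum : ((pvParents parents_map cls).map
        ((fun e => (pvBr parents_map + 1) ^ e.1) ∘ fun parent => (fuel', parent, path ++ [parent]))).sum
        = (pvParents parents_map cls).length * (pvBr parents_map + 1) ^ fuel' := by
      simp [Function.comp_def]
    simp only [List.map_cons, List.sum_cons, hsum, pow_succ]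
    have : (pvParents parents_map cls).length * (pvBr parents_map + 1) ^ fuel'
        ≤ pvBr parents_map * (pvBr parents_map + 1) ^ fuel' := Nat.mul_le_mul_right _ hlen
    nlinarith

def find_paths_to_root_with_map_alt (start_class : String) (parents_map : List (String × List String)) : List (List String) :=
  pvStackRun parents_map [(parents_map.length + 1, start_class, [start_class])] []

-- ===== PRECONDITION & SPEC =====
-- Bounded closure of the parent relation (saturates: sees every reachable node,
-- duplicates erased each round).
def pvClose (parents_map : List (String × List String)) : Nat → List String → List String
  | 0, seen => seen
  | n + 1, seen => pvClose parents_map n ((seen ++ seen.flatMap (pvParents parents_map)).eraseDups)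

def pvCloseFuel (parents_map : List (String × List String)) : Nat :=
  parents_map.length + (parents_map.map (fun e => e.2.length)).sum + 1

-- Pre_ excludes exactly the maps with a parent-cycle reachable from start_class, on which
-- A's recursion never terminates (Python raises RecursionError).
def Pre_find_paths_to_root_with_map (start_class : String) (parents_map : List (String × List String)) : Prop :=
  ∀ k ∈ pvClose parents_map (pvCloseFuel parents_map) [start_class],
    k ∉ pvClose parents_map (pvCloseFuel parents_map) (pvParents parents_map k)

instance (start_class : String) (parents_map : List (String × List String)) : Decidable (Pre_find_paths_to_root_with_map start_class parents_map) := by unfold Pre_find_paths_to_root_with_map; infer_instance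

def pvWitness_find_paths_to_root_with_map : String × (List (String × List String)) :=
  ("a", [("a", ["b", "c"]), ("b", ["c"])])

def Spec_find_paths_to_root_with_map (start_class : String) (parents_map : List (String × List String)) (out : List (List String)) : Prop := out = find_paths_to_root_with_map_alt start_class parents_map
instance (start_class : String) (parents_map : List (String × List String)) (out : List (List String)) : Decidable (Spec_find_paths_to_root_with_map start_class parents_map out) := by unfold Spec_find_paths_to_root_with_map; infer_instance

-- ===== CLAIM (what is proved, stated in full; the proofs are below) =====
def Claim_equal_find_paths_to_root_with_map : Prop := ∀ (start_class : String) (parents_map : List (String × List String)), Dom_find_paths_to_root_with_map start_class parents_map → Pre_find_paths_to_root_with_map start_class parents_map → Spec_find_paths_to_root_with_map start_class parents_map (find_paths_to_root_with_map start_class parents_map)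

-- ===== LEMMAS AND PROOFS =====

-- popping one stack entry produces exactly what A's recursive dfs appends for it
theorem pv_main (parents_map : List (String × List String)) :
    ∀ (f : Nat) (c : String) (p : List String) (rest : List (Nat × String × List String)) (res : List (List String)),
      pvStackRun parents_map ((f, c, p) :: rest) res
        = pvStackRun parents_map rest (pvDfsA parents_map f c p res) := by
  intro f
  induction f with
  | zero =>
      intro c p rest res
      by_cases h : (pvParents parents_map c).isEmpty <;>
        simp [pvStackRun, pvDfsA, h]
  | succ f' ih =>
      intro c p rest res
      by_cases h : (pvParents parents_map c).isEmpty
      · simp [pvStackRun, pvDfsA, h]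
      · have L2 : ∀ (l : List String) (rest : List (Nat × String × List String)) (res : List (List String)),
            pvStackRun parents_map (l.map (fun q => (f', q, p ++ [q])) ++ rest) res
              = pvStackRun parents_map rest (l.foldl (fun a q => pvDfsA parents_map f' q (p ++ [q]) a) res) := by
          intro l
          induction l with
          | nil => simp
          | cons q l ihl =>
              intro rest res
              simp only [List.map_cons, List.cons_append, List.foldl_cons]
              rw [ih]
              exact ihl _ _
        rw [pvStackRun]
        simp only [h, if_neg, Bool.false_eq_true, not_false_iff]
        rw [pv_foldl_cons, List.reverse_reverse]
        rw [pvDfsA]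
        simp only [h, if_neg, Bool.false_eq_true, not_false_iff]
        exact L2 _ _ _

-- ===== VERDICT (by name: the statement is the Claim_ definition above) =====
theorem find_paths_to_root_with_map_spec : Claim_equal_find_paths_to_root_with_map := by
  intro s pm _ _
  unfold Spec_find_paths_to_root_with_map find_paths_to_root_with_map find_paths_to_root_with_map_alt
  rw [pv_main, pvStackRun]
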